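-- pv_equiv track=rewrite | github.com/ghanshyam2/pythonProject | Files/geek Coins.py | geekCoins
-- ===== SOURCE A (Python) =====
-- def geekCoins(n):
--     coin = 0
--
--     for i in range(1, n+1):
--         if i % 8 == 0:
--             coin += 9
--         else:
--             coin += 1
--     return coin
-- ===== SOURCE B (Python) =====
-- def geekCoins(n):
--     m = max(n, 0)
--     return m + 8 * (m // 8)
-- ===== Notes on version B (the rewrite author's own statement) =====
-- stated objective: faster
-- what changed: Replaced the O(n) loop summing 9 per multiple of 8 and 1 otherwise with the closed form m + 8*(m//8) where m = max(n, 0).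
import Mathlib
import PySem

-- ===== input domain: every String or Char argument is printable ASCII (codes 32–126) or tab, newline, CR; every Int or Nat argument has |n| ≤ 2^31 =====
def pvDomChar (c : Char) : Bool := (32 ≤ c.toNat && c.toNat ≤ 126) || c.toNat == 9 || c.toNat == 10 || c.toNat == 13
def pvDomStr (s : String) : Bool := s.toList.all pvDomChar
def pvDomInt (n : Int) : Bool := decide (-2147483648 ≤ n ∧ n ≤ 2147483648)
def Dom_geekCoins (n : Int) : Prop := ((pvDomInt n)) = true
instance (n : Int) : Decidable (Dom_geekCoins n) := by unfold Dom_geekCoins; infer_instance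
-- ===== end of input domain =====

-- ===== PORT A =====
-- B: closed form instead of the O(n) loop (measurably faster; asymptotic change).
def geekCoins (n : Int) : Int :=
  (PySem.List.pyRange 1 (n+1) 1).foldl
    (fun coin i => if PySem.Int.mod i 8 == 0 then coin + 9 else coin + 1) 0

-- ===== PORT B =====
def geekCoins_alt (n : Int) : Int :=
  let m := max n 0
  m + 8 * PySem.Int.floordiv m 8

-- ===== PRECONDITION & SPEC =====
def Spec_geekCoins (n : Int) (out : Int) : Prop := out = geekCoins_alt n
instance (n : Int) (out : Int) : Decidable (Spec_geekCoins n out) := by unfold Spec_geekCoins; infer_instance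

-- ===== CLAIM (what is proved, stated in full; the proofs are below) =====
def Claim_equal_geekCoins : Prop := ∀ (n : Int), Dom_geekCoins n → Spec_geekCoins n (geekCoins n)

-- ===== LEMMAS AND PROOFS =====

-- ===== VERDICT (by name: the statement is the Claim_ definition above) =====
theorem geekCoins_nat (m : Nat) : geekCoins (m : Int) = (m : Int) + 8 * ((m / 8 : Nat) : Int) := by
  induction m with
  | zero => decide
  | succ k ih =>
    unfold geekCoins at ih ⊢
    have hc : ((k+1 : Nat) : Int) = (k:Int) + 1 := by push_cast; ring
    rw [hc]
    have hle : (1:Int) ≤ (k:Int) + 1 := by omega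
    rw [PySem.List.pyRange_one_succ_right hle, List.foldl_append]
    simp only [List.foldl_cons, List.foldl_nil]
    have hmod : PySem.Int.mod ((k:Int)+1) 8 = ((((k+1) % 8 : Nat)) : Int) := by
      exact_mod_cast PySem.Int.mod_natCast (k+1) 8
    rw [ih]
    by_cases h8 : (k+1) % 8 = 0
    · rw [show (PySem.Int.mod ((k:Int)+1) 8 == 0) = true by rw [hmod, h8]; simp]
      simp only [if_true]
      rw [show (k+1)/8 = k/8 + 1 by omega]
      push_cast; ring
    · rw [show (PySem.Int.mod ((k:Int)+1) 8 == 0) = false by rw [hmod]; simp; omega]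
      simp only [if_false, Bool.false_eq_true]
      rw [show (k+1)/8 = k/8 by omega]
      push_cast; ring

theorem geekCoins_spec : Claim_equal_geekCoins := by
  intro n _
  unfold Spec_geekCoins geekCoins_alt
  by_cases hn : 0 ≤ n
  · obtain ⟨m, rfl⟩ := Int.eq_ofNat_of_zero_le hn
    rw [geekCoins_nat m]
    have hmax : max ((m:Int)) 0 = (m:Int) := by omega
    simp only [hmax]
    rw [show PySem.Int.floordiv (m:Int) 8 = ((m / 8 : Nat) : Int) from
      by exact_mod_cast PySem.Int.floordiv_natCast m 8]
  · have hmax : max n 0 = (0:Int) := by omega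
    have hempty : PySem.List.pyRange 1 (n+1) 1 = [] := by
      apply List.eq_nil_iff_forall_not_mem.mpr
      intro x hx
      rw [PySem.List.mem_pyRange_one] at hx
      omega
    unfold geekCoins
    rw [hempty, hmax]
    simp [PySem.Int.floordiv]
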